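-- pv_equiv track=rewrite | github.com/throwaway670/boot | ciphers.py | encrypt_playfair
-- ===== SOURCE A (Python) =====
-- def _pf_square(key):
--     key = "".join(ch for ch in key.upper() if ch.isalpha()).replace("J", "I")
--     alphabet = "ABCDEFGHIKLMNOPQRSTUVWXYZ"
--     seen, seq = set(), []
--     for ch in key + alphabet:
--         if ch not in seen:
--             seen.add(ch)
--             seq.append(ch)
--     square = [seq[i:i+5] for i in range(0, 25, 5)]
--     pos = {square[r][c]: (r, c) for r in range(5) for c in range(5)}
--     return square, pos
--
-- def _pf_pairs(text):
--     s = "".join(ch for ch in text.upper() if ch.isalpha()).replace("J", "I")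
--     pairs, i = [], 0
--     while i < len(s):
--         a = s[i]
--         b = s[i+1] if i+1 < len(s) else None
--         if b is None or a == b:
--             pairs.append((a, "X"))
--             i += 1
--         else:
--             pairs.append((a, b))
--             i += 2
--     return pairs
--
-- def encrypt_playfair(text, key):
--     square, pos = _pf_square(key)
--     out = []
--     for a, b in _pf_pairs(text):
--         ra, ca = pos[a]; rb, cb = pos[b]
--         if ra == rb:
--             out.append(square[ra][(ca + 1) % 5])
--             out.append(square[rb][(cb + 1) % 5])
--         elif ca == cb:
--             out.append(square[(ra + 1) % 5][ca])
--             out.append(square[(rb + 1) % 5][cb])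
--         else:
--             out.append(square[ra][cb])
--             out.append(square[rb][ca])
--     return "".join(out)
-- ===== SOURCE B (Python) =====
-- def encrypt_playfair(text, key):
--     # Precompute a full 625-entry digraph substitution table once, then
--     # encryption is pure table lookup over uniformly chunked normalized text.
--     ck = "".join(ch for ch in key.upper() if ch.isalpha()).replace("J", "I")
--     seq = "".join(dict.fromkeys(ck + "ABCDEFGHIKLMNOPQRSTUVWXYZ"))
--     table = {}
--     for i, a in enumerate(seq):
--         ra, ca = divmod(i, 5)
--         for j, b in enumerate(seq):
--             rb, cb = divmod(j, 5)
--             if ra == rb: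
--                 table[a + b] = seq[ra*5 + (ca+1) % 5] + seq[rb*5 + (cb+1) % 5]
--             elif ca == cb:
--                 table[a + b] = seq[((ra+1) % 5)*5 + ca] + seq[((rb+1) % 5)*5 + cb]
--             else:
--                 table[a + b] = seq[ra*5 + cb] + seq[rb*5 + ca]
--     s = "".join(ch for ch in text.upper() if ch.isalpha()).replace("J", "I")
--     norm = []
--     for ch in s:
--         if len(norm) % 2 == 1 and norm[-1] == ch:
--             norm.append("X")
--         norm.append(ch)
--     if len(norm) % 2 == 1:
--         norm.append("X")
--     return "".join(table[a + b] for a, b in zip(norm[::2], norm[1::2]))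
-- ===== Notes on version B (the rewrite author's own statement) =====
-- stated objective: alternative
-- what changed: B precomputes the full 625-entry digraph substitution table from the deduplicated 25-letter sequence (dedup via dict.fromkeys, coordinates via divmod flat-index arithmetic instead of the 5x5 square plus position dict), normalizes the text into one X-padded string in a single pass instead of A's lookahead while-loop, and encrypts by pure table lookup over uniform even/odd chunking.
import Mathlib
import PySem

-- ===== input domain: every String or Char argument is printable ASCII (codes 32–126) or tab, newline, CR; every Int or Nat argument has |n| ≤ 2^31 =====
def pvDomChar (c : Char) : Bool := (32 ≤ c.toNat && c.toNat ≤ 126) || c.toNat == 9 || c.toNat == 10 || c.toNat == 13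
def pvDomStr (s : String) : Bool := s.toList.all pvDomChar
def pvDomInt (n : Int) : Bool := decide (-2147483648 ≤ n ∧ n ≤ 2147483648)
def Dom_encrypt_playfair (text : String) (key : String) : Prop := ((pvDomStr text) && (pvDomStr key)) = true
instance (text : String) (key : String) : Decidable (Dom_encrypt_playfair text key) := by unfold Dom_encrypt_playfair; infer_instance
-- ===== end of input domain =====

-- B precomputes the full 625-entry digraph substitution table once (dedup via dict.fromkeys,
-- divmod flat-index arithmetic instead of A's 5×5 square + position dict), normalizes the text
-- into one X-padded string in a single pass instead of A's lookahead while-loop, and encrypts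
-- by pure table lookup over uniform even/odd chunking (objective: alternative; no speed claim).

-- ===== PORT A =====

-- the Playfair alphabet string (I/J merged)
def pfALPHA : List Char :=
  ['A','B','C','D','E','F','G','H','I','K','L','M','N','O','P','Q','R','S','T','U','V','W','X','Y','Z']

-- '"".join(ch for ch in s.upper() if ch.isalpha()).replace("J","I")' — identical line in A and B
def pfClean (s : List Char) : List Char :=
  PySem.Chars.replace ((PySem.Chars.upper s).filter PySem.Chars.isalpha) ['J'] ['I']

-- 'square[r][c]' — both indices are always in range where A evaluates this (getD default unreachable)
def pfSqA (square : List (List Char)) (r c : Int) : Char :=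
  ((PySem.List.pyGet? square r).bind (fun row => PySem.List.pyGet? row c)).getD ' '

-- 'square = [seq[i:i+5] for i in range(0, 25, 5)]'
def pfSquareOf (seq : List Char) : List (List Char) :=
  (PySem.List.pyRange 0 25 5).map (fun i => PySem.List.slice seq (some i) (some (i + 5)))

-- 'pos = {square[r][c]: (r, c) for r in range(5) for c in range(5)}'
def pfPosOf (seq : List Char) : PySem.Dict Char (Int × Int) :=
  (PySem.List.pyRange 0 5 1).foldl
    (fun d r => (PySem.List.pyRange 0 5 1).foldl
      (fun d c => d.insert (pfSqA (pfSquareOf seq) r c) (r, c)) d)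
    PySem.Dict.empty

def pfSquare (key : List Char) : (List (List Char)) × PySem.Dict Char (Int × Int) :=
  let st := (pfClean key ++ pfALPHA).foldl
    (fun (st : PySem.Set Char × List Char) ch =>
      if PySem.Set.contains st.1 ch then st else (PySem.Set.add st.1 ch, st.2 ++ [ch]))
    (PySem.Set.empty, [])
  (pfSquareOf st.2, pfPosOf st.2)

-- A's while-loop over the cleaned text, as structural recursion on the remaining suffix
def pfPairs : List Char → List (Char × Char)
  | [] => []
  | [a] => [(a, 'X')]
  | a :: b :: r => if a == b then (a, 'X') :: pfPairs (b :: r) else (a, b) :: pfPairs r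

def encrypt_playfair (text : String) (key : String) : String :=
  let sp := pfSquare key.toList
  let square := sp.1
  let pos := sp.2
  let out := (pfPairs (pfClean text.toList)).foldl
    (fun out ab =>
      -- 'pos[a]' / 'pos[b]': every processed letter is a key of pos here (getD default unreachable)
      let ra := ((pos.get? ab.1).getD (0, 0)).1
      let ca := ((pos.get? ab.1).getD (0, 0)).2
      let rb := ((pos.get? ab.2).getD (0, 0)).1
      let cb := ((pos.get? ab.2).getD (0, 0)).2
      if ra = rb then
        out ++ [pfSqA square ra (PySem.Int.mod (ca + 1) 5)] ++ [pfSqA square rb (PySem.Int.mod (cb + 1) 5)]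
      else if ca = cb then
        out ++ [pfSqA square (PySem.Int.mod (ra + 1) 5) ca] ++ [pfSqA square (PySem.Int.mod (rb + 1) 5) cb]
      else
        out ++ [pfSqA square ra cb] ++ [pfSqA square rb ca])
    []
  String.ofList out

-- ===== PORT B =====

-- 'seq[i]' — index always in range where B evaluates this (getD default unreachable)
def pfSqB (seq : List Char) (i : Int) : Char :=
  (PySem.List.pyGet? seq i).getD ' '

-- the value stored for the digraph at flat indices (i, j): divmod(i,5)/divmod(j,5) + the three rules
def pfVal (seq : List Char) (i j : Nat) : List Char :=
  let ra := PySem.Int.floordiv (i : Int) 5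
  let ca := PySem.Int.mod (i : Int) 5
  let rb := PySem.Int.floordiv (j : Int) 5
  let cb := PySem.Int.mod (j : Int) 5
  if ra = rb then
    [pfSqB seq (ra * 5 + PySem.Int.mod (ca + 1) 5), pfSqB seq (rb * 5 + PySem.Int.mod (cb + 1) 5)]
  else if ca = cb then
    [pfSqB seq (PySem.Int.mod (ra + 1) 5 * 5 + ca), pfSqB seq (PySem.Int.mod (rb + 1) 5 * 5 + cb)]
  else
    [pfSqB seq (ra * 5 + cb), pfSqB seq (rb * 5 + ca)]

-- B's nested 'for i, a in enumerate(seq): for j, b in enumerate(seq): table[a+b] = …'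
def pfTable (seq : List Char) : PySem.Dict String (List Char) :=
  (seq.zipIdx).foldl
    (fun d ai => (seq.zipIdx).foldl
      (fun d bj => d.insert (String.ofList [ai.1, bj.1]) (pfVal seq ai.2 bj.2)) d)
    PySem.Dict.empty

-- one step of B's normalization loop
def pfNormStep (norm : List Char) (ch : Char) : List Char :=
  if norm.length % 2 == 1 && (PySem.List.pyGet? norm (-1) == some ch) then
    norm ++ ['X'] ++ [ch]
  else
    norm ++ [ch]

def encrypt_playfair_alt (text : String) (key : String) : String :=
  let seq := PySem.List.dedup (pfClean key.toList ++ pfALPHA)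
  let table := pfTable seq
  let norm0 := (pfClean text.toList).foldl pfNormStep []
  let norm := if norm0.length % 2 == 1 then norm0 ++ ['X'] else norm0
  let pairs := List.zip ((PySem.List.slice? norm none none 2).getD [])
                        ((PySem.List.slice? norm (some 1) none 2).getD [])
  -- 'table[a+b]': every normalized digraph is a key of table (getD default unreachable)
  String.ofList (pairs.map (fun ab => (table.get? (String.ofList [ab.1, ab.2])).getD [])).flatten

-- ===== PRECONDITION & SPEC =====
def Spec_encrypt_playfair (text : String) (key : String) (out : String) : Prop := out = encrypt_playfair_alt text key
instance (text : String) (key : String) (out : String) : Decidable (Spec_encrypt_playfair text key out) := by unfold Spec_encrypt_playfair; infer_instance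

-- ===== CLAIM (what is proved, stated in full; the proofs are below) =====
def Claim_equal_encrypt_playfair : Prop := ∀ (text : String) (key : String), Dom_encrypt_playfair text key → Spec_encrypt_playfair text key (encrypt_playfair text key)

-- ===== LEMMAS AND PROOFS =====

def subJI (c : Char) : Char := if c = 'J' then 'I' else c

lemma goJI : ∀ (fuel : Nat) (l acc : List Char), l.length ≤ fuel →
    PySem.Chars.replace.go ['J'] ['I'] fuel l acc = acc.reverse ++ l.map subJI := by
  intro fuel
  induction fuel with
  | zero => intro l acc h; rw [PySem.Chars.replace.go.eq_def]; cases l with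
    | nil => simp
    | cons c t => simp at h
  | succ n ih =>
    intro l acc h
    rw [PySem.Chars.replace.go.eq_def]
    cases l with
    | nil => simp
    | cons c t =>
      simp only [List.isPrefixOf]
      by_cases hc : c = 'J'
      · subst hc
        rw [if_pos (by simp)]
        rw [ih _ _ (by simpa using Nat.le_of_succ_le_succ h)]
        simp [subJI]
      · rw [if_neg (by simp; exact fun h' => hc h'.symm)]
        rw [ih _ _ (by simpa using Nat.le_of_succ_le_succ h)]
        simp [subJI, hc]

lemma replJI (l : List Char) : PySem.Chars.replace l ['J'] ['I'] = l.map subJI := by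
  rw [PySem.Chars.replace]
  simp only [List.isEmpty_cons]
  exact (goJI l.length l [] le_rfl).trans (by simp)

lemma isupper_toNat {c : Char} (h : PySem.Chars.isupper c = true) : 65 ≤ c.toNat ∧ c.toNat ≤ 90 := by
  simp only [PySem.Chars.isupper, Bool.and_eq_true, decide_eq_true_eq, Char.le_def] at h
  exact ⟨h.1, h.2⟩

lemma islower_toNat {c : Char} (h : PySem.Chars.islower c = true) : 97 ≤ c.toNat ∧ c.toNat ≤ 122 := by
  simp only [PySem.Chars.islower, Bool.and_eq_true, decide_eq_true_eq, Char.le_def] at h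
  exact ⟨h.1, h.2⟩

lemma isupper_upperChar_of_isalpha {c : Char} (h : PySem.Chars.isalpha (PySem.Chars.upperChar c) = true) :
    PySem.Chars.isupper (PySem.Chars.upperChar c) = true := by
  simp only [PySem.Chars.isalpha, Bool.or_eq_true] at h
  rcases h with h | h
  · exact h
  · exfalso
    unfold PySem.Chars.upperChar at h
    split_ifs at h with hl
    · obtain ⟨h1, h2⟩ := islower_toNat hl
      obtain ⟨h3, h4⟩ := islower_toNat h
      have : (Char.ofNat (c.toNat - 32)).toNat = c.toNat - 32 := by
        rw [Char.toNat_ofNat, if_pos (Or.inl (by omega : c.toNat - 32 < 0xd800))]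
      omega
    · exact hl h

lemma mem_pfALPHA_of_isupper {c : Char} (h : PySem.Chars.isupper c = true) (hj : c ≠ 'J') :
    c ∈ pfALPHA := by
  obtain ⟨h1, h2⟩ := isupper_toNat h
  have hofn : Char.ofNat c.toNat = c := Char.ofNat_toNat c
  interval_cases hc : c.toNat <;>
    first
      | (rw [← hofn]; decide)
      | (exact absurd (hofn.symm.trans (by decide)) hj)

lemma clean_mem_alpha {s : List Char} {c : Char} (h : c ∈ pfClean s) : c ∈ pfALPHA := by
  unfold pfClean at h
  rw [replJI] at h
  simp only [List.mem_map] at h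
  obtain ⟨c', hc', rfl⟩ := h
  rw [List.mem_filter] at hc'
  obtain ⟨hmem, halpha⟩ := hc'
  simp only [PySem.Chars.upper, List.mem_map] at hmem
  obtain ⟨c'', _, rfl⟩ := hmem
  have hup := isupper_upperChar_of_isalpha halpha
  unfold subJI
  split_ifs with hJ
  · decide
  · exact mem_pfALPHA_of_isupper hup hJ

-- === seq ===
lemma seqAB : ∀ (L : List Char) (seen : PySem.Set Char) (seq : List Char),
    (∀ c, PySem.Set.contains seen c = seq.contains c) →
    (L.foldl (fun (st : PySem.Set Char × List Char) ch =>
        if PySem.Set.contains st.1 ch then st else (PySem.Set.add st.1 ch, st.2 ++ [ch])) (seen, seq)).2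
      = L.foldl (fun sq ch => if sq.contains ch then sq else sq ++ [ch]) seq := by
  intro L
  induction L with
  | nil => intro seen seq h; rfl
  | cons a t ih =>
    intro seen seq h
    simp only [List.foldl_cons]
    by_cases hc : seq.contains a
    · rw [if_pos (by rw [h]; exact hc), if_pos hc]
      exact ih seen seq h
    · rw [if_neg (by rw [h]; exact hc), if_neg hc]
      apply ih
      intro c
      rw [PySem.Set.add, if_neg (by rw [h]; exact hc)]
      simp only [PySem.Set.contains, List.contains_append] at h ⊢
      rw [h c]

lemma seqB_ofList (L : List Char) :
    L.foldl (fun sq ch => if sq.contains ch then sq else sq ++ [ch]) [] = PySem.Set.ofList L := by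
  rw [PySem.Set.ofList_eq_foldl]
  rfl

-- === pairing ===
def pfPairsOf : List Char → List (Char × Char)
  | [] => []
  | [_] => []
  | a :: b :: r => (a, b) :: pfPairsOf r

def pfEvens : List Char → List Char
  | [] => []
  | [a] => [a]
  | a :: _ :: r => a :: pfEvens r

def pfOdds : List Char → List Char
  | [] => []
  | _ :: t => pfEvens t

lemma zip_evens_odds : ∀ m : List Char, List.zip (pfEvens m) (pfOdds m) = pfPairsOf m := by
  intro m
  induction m using pfPairsOf.induct with
  | case1 => rfl
  | case2 a => rfl
  | case3 a b r ih =>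
    cases r with
    | nil => rfl
    | cons c r' =>
      simp only [pfEvens, pfOdds, List.zip_cons_cons, pfPairsOf]
      rw [← ih]
      simp [pfOdds]

lemma evCore : ∀ xs : List Char,
    List.filterMap (fun k : Nat => xs[2*k]?) (List.range ((xs.length + 1) / 2)) = pfEvens xs := by
  intro xs
  induction xs using pfEvens.induct with
  | case1 => rfl
  | case2 a => simp [List.range_succ, pfEvens]
  | case3 a b r ih =>
    have hlen : ((a :: b :: r).length + 1) / 2 = (r.length + 1) / 2 + 1 := by
      simp [List.length_cons]; omega
    rw [hlen, List.range_succ_eq_map, List.filterMap_cons, List.filterMap_map]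
    simp only [Nat.mul_zero, List.getElem?_cons_zero]
    show a :: List.filterMap ((fun k : Nat => (a :: b :: r)[2 * k]?) ∘ Nat.succ) (List.range ((r.length + 1) / 2)) = pfEvens (a :: b :: r)
    show _ = a :: pfEvens r
    exact congrArg (List.cons a) ih

lemma sliceEvens (xs : List Char) : (PySem.List.slice? xs none none 2).getD [] = pfEvens xs := by
  rw [← evCore]
  unfold PySem.List.slice? PySem.List.sliceIndices
  norm_num
  have hcnt : (if 0 < xs.length then (((xs.length : Int) + 2 - 1) / 2).toNat else 0) = (xs.length + 1) / 2 := by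
    split_ifs with h <;> omega
  rw [hcnt]
  apply List.filterMap_congr
  intro x _
  have h2 : ((2 * (x : Int)).toNat) = 2 * x := by omega
  rw [h2]

lemma sliceOdds (xs : List Char) : (PySem.List.slice? xs (some 1) none 2).getD [] = pfOdds xs := by
  cases xs with
  | nil => rfl
  | cons a t =>
    show _ = pfEvens t
    rw [← evCore t]
    simp only [PySem.List.slice?, PySem.List.sliceIndices]
    norm_num
    have hcnt : (if 0 < t.length then (((t.length : Int) + 2 - 1) / 2).toNat else 0) = (t.length + 1) / 2 := by
      split_ifs with h <;> omega
    rw [hcnt]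
    apply List.filterMap_congr
    intro x _
    have h2 : ((1 + 2 * (x : Int)).toNat) = 2 * x + 1 := by omega
    rw [h2]
    simp

-- === normalization ===
def pfFinal (m : List Char) : List Char := if m.length % 2 == 1 then m ++ ['X'] else m

lemma pyGet_neg_one_append (p n : List Char) (hn : n ≠ []) :
    PySem.List.pyGet? (p ++ n) (-1) = PySem.List.pyGet? n (-1) := by
  unfold PySem.List.pyGet? PySem.List.pyIdx?
  have h1 : ¬ (0:Int) ≤ -1 := by norm_num
  have hnl : 0 < n.length := List.length_pos_iff.mpr hn
  rw [if_neg h1, if_neg h1,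
      if_pos (by simp; omega : -((p ++ n).length:Int) ≤ -1),
      if_pos (by omega : -(n.length:Int) ≤ -1)]
  simp only [Option.bind_some]
  rw [List.getElem?_append_right (by simp; omega)]
  congr 1
  simp
  omega

lemma normStep_append (p n : List Char) (c : Char) (hp : p.length % 2 = 0) :
    pfNormStep (p ++ n) c = p ++ pfNormStep n c := by
  unfold pfNormStep
  cases n with
  | nil =>
    have : ((p ++ ([] : List Char)).length % 2 == 1) = false := by simp [hp]
    rw [this]
    simp
  | cons a t =>
    have : (p ++ a :: t).length % 2 = (a :: t).length % 2 := by simp [List.length_append]; omega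
    rw [this, pyGet_neg_one_append p (a :: t) (by simp)]
    by_cases hc : ((a :: t).length % 2 == 1 && (PySem.List.pyGet? (a :: t) (-1) == some c)) = true
    · rw [if_pos hc, if_pos hc]; simp
    · rw [if_neg hc, if_neg hc]; simp

lemma foldNorm_append (r : List Char) : ∀ (p n : List Char), p.length % 2 = 0 →
    r.foldl pfNormStep (p ++ n) = p ++ r.foldl pfNormStep n := by
  induction r with
  | nil => intro p n _; simp
  | cons c r ih =>
    intro p n hp
    simp only [List.foldl_cons]
    rw [normStep_append p n c hp, ih p _ hp]

lemma pfFinal_append (p x : List Char) (hp : p.length % 2 = 0) :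
    pfFinal (p ++ x) = p ++ pfFinal x := by
  unfold pfFinal
  have : (p ++ x).length % 2 = x.length % 2 := by simp [List.length_append]; omega
  rw [this]
  by_cases hx : (x.length % 2 == 1) = true
  · rw [if_pos hx, if_pos hx]; simp
  · rw [if_neg hx, if_neg hx]

lemma pairs_norm : ∀ s : List Char, pfPairs s = pfPairsOf (pfFinal (s.foldl pfNormStep [])) := by
  intro s
  induction s using pfPairs.induct with
  | case1 => rfl
  | case2 a => rfl
  | case3 a b r hab ih =>
    have hab' : a = b := by simpa using hab
    subst hab'
    rw [pfPairs]
    rw [if_pos (by simp)]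
    have h1 : pfNormStep [] a = [a] := rfl
    have h2 : pfNormStep [a] a = [a, 'X'] ++ [a] := by
      unfold pfNormStep
      rw [if_pos (by simp [PySem.List.pyGet?, PySem.List.pyIdx?])]
      rfl
    calc (a, 'X') :: pfPairs (a :: r)
        = (a, 'X') :: pfPairsOf (pfFinal ((a :: r).foldl pfNormStep [])) := by rw [ih]
      _ = pfPairsOf (pfFinal ((a :: a :: r).foldl pfNormStep [])) := by
          simp only [List.foldl_cons, h1, h2]
          rw [foldNorm_append r [a, 'X'] [a] (by simp)]
          rw [pfFinal_append [a, 'X'] _ (by simp)]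
          rfl
  | case4 a b r hab ih =>
    rw [pfPairs, if_neg hab]
    have hab' : ¬ a = b := by simpa using hab
    have h1 : pfNormStep [] a = [a] := rfl
    have h2 : pfNormStep [a] b = [a, b] := by
      unfold pfNormStep
      rw [if_neg (by simp [PySem.List.pyGet?, PySem.List.pyIdx?]; exact fun h => absurd h hab')]
      rfl
    calc (a, b) :: pfPairs r
        = (a, b) :: pfPairsOf (pfFinal (r.foldl pfNormStep [])) := by rw [ih]
      _ = pfPairsOf (pfFinal ((a :: b :: r).foldl pfNormStep [])) := by
          simp only [List.foldl_cons, h1, h2]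
          have : ([a, b] : List Char) = [a, b] ++ [] := by simp
          rw [this, foldNorm_append r [a, b] [] (by simp)]
          rw [pfFinal_append [a, b] _ (by simp)]
          rfl

-- === square / pos ===
def pfL25 : List (Int × Int) :=
  (PySem.List.pyRange 0 5 1).flatMap (fun r => (PySem.List.pyRange 0 5 1).map (fun c => (r, c)))

def pfF (j : Nat) : Int × Int := (((j / 5 : Nat) : Int), ((j % 5 : Nat) : Int))

lemma square_pos_char (seq : List Char) (h25 : seq.length = 25) :
    (pfL25.map (fun rc => (pfSqA (pfSquareOf seq) rc.1 rc.2, rc))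
        = (seq.zipIdx 0).map (fun p => (p.1, pfF p.2)))
    ∧ (∀ r c : Int, 0 ≤ r → r < 5 → 0 ≤ c → c < 5 →
        pfSqA (pfSquareOf seq) r c = (PySem.List.pyGet? seq (r * 5 + c)).getD ' ') := by
  rcases seq with _ | ⟨c0, seq⟩
  · simp at h25
  rcases seq with _ | ⟨c1, seq⟩
  · simp at h25
  rcases seq with _ | ⟨c2, seq⟩
  · simp at h25
  rcases seq with _ | ⟨c3, seq⟩
  · simp at h25
  rcases seq with _ | ⟨c4, seq⟩
  · simp at h25
  rcases seq with _ | ⟨c5, seq⟩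
  · simp at h25
  rcases seq with _ | ⟨c6, seq⟩
  · simp at h25
  rcases seq with _ | ⟨c7, seq⟩
  · simp at h25
  rcases seq with _ | ⟨c8, seq⟩
  · simp at h25
  rcases seq with _ | ⟨c9, seq⟩
  · simp at h25
  rcases seq with _ | ⟨c10, seq⟩
  · simp at h25
  rcases seq with _ | ⟨c11, seq⟩
  · simp at h25
  rcases seq with _ | ⟨c12, seq⟩
  · simp at h25
  rcases seq with _ | ⟨c13, seq⟩
  · simp at h25
  rcases seq with _ | ⟨c14, seq⟩
  · simp at h25
  rcases seq with _ | ⟨c15, seq⟩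
  · simp at h25
  rcases seq with _ | ⟨c16, seq⟩
  · simp at h25
  rcases seq with _ | ⟨c17, seq⟩
  · simp at h25
  rcases seq with _ | ⟨c18, seq⟩
  · simp at h25
  rcases seq with _ | ⟨c19, seq⟩
  · simp at h25
  rcases seq with _ | ⟨c20, seq⟩
  · simp at h25
  rcases seq with _ | ⟨c21, seq⟩
  · simp at h25
  rcases seq with _ | ⟨c22, seq⟩
  · simp at h25
  rcases seq with _ | ⟨c23, seq⟩
  · simp at h25
  rcases seq with _ | ⟨c24, seq⟩
  · simp at h25
  have hseq : seq = [] := by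
    cases seq with
    | nil => rfl
    | cons z t => exfalso; simp at h25
  subst hseq
  constructor
  · with_unfolding_all rfl
  · intro r c hr0 hr5 hc0 hc5
    interval_cases r <;> interval_cases c <;> with_unfolding_all rfl

lemma find_assoc (f : Nat → Int × Int) : ∀ (l : List Char) (n : Nat), l.Nodup →
    ∀ i, (h : i < l.length) →
    List.find? (fun p => p.1 == l[i]) ((l.zipIdx n).map (fun p => (p.1, f p.2)))
      = some (l[i], f (n + i)) := by
  intro l
  induction l with
  | nil => intro n _ i h; simp at h
  | cons c t ih =>
    intro n hnd i h
    simp only [List.length_cons] at h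
    rcases List.nodup_cons.mp hnd with ⟨hc, hndt⟩
    cases i with
    | zero => simp
    | succ i =>
      have hit : i < t.length := by omega
      have hne : (c == t[i]) = false := by
        simp only [beq_eq_false_iff_ne, ne_eq]
        intro he
        exact hc (he ▸ List.getElem_mem _)
      simp only [List.zipIdx_cons, List.map_cons, List.find?_cons, hne, List.getElem_cons_succ]
      rw [ih (n + 1) hndt i hit]
      have hn : n + 1 + i = n + (i + 1) := by omega
      rw [hn]

lemma pos_get (seq : List Char) (h25 : seq.length = 25) (hnd : seq.Nodup)
    (i : Nat) (hi : i < seq.length) :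
    (pfPosOf seq).get? seq[i] = some (((i / 5 : Nat) : Int), ((i % 5 : Nat) : Int)) := by
  have hflat : pfPosOf seq = pfL25.foldl
      (fun d rc => d.insert (pfSqA (pfSquareOf seq) rc.1 rc.2) rc) PySem.Dict.empty := by
    have hr5 : PySem.List.pyRange 0 5 1 = [0, 1, 2, 3, 4] := by decide
    unfold pfPosOf pfL25
    rw [hr5]
    simp only [List.flatMap_cons, List.map_cons, List.map_nil, List.flatMap_nil,
      List.append_nil, List.cons_append, List.nil_append,
      List.foldl_cons, List.foldl_nil]
  have hkeys : pfL25.map (fun rc => pfSqA (pfSquareOf seq) rc.1 rc.2) = seq := by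
    have h1 := congrArg (List.map Prod.fst) (square_pos_char seq h25).1
    simpa [List.map_map, Function.comp] using h1.trans (by
      simp [List.map_map]
      exact List.zipIdx_map_fst 0 seq)
  have hitems : (pfPosOf seq).items = (seq.zipIdx 0).map (fun p => (p.1, pfF p.2)) := by
    rw [hflat]
    rw [PySem.Dict.items_foldl_insert_fresh pfL25
          (fun rc => pfSqA (pfSquareOf seq) rc.1 rc.2) (fun rc => rc) PySem.Dict.empty
          (fun _ _ => rfl) (by rw [hkeys]; exact hnd)]
    have := (square_pos_char seq h25).1
    simpa using this
  show ((pfPosOf seq).items.find? (fun p => p.1 == seq[i])).map (·.2) = _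
  rw [hitems, find_assoc pfF seq 0 hnd i hi]
  simp [pfF]

-- A's encryption of one digraph, as the list of the two letters it appends
def pfGA (seq : List Char) (ab : Char × Char) : List Char :=
  let ra := (((pfPosOf seq).get? ab.1).getD (0, 0)).1
  let ca := (((pfPosOf seq).get? ab.1).getD (0, 0)).2
  let rb := (((pfPosOf seq).get? ab.2).getD (0, 0)).1
  let cb := (((pfPosOf seq).get? ab.2).getD (0, 0)).2
  if ra = rb then
    [pfSqA (pfSquareOf seq) ra (PySem.Int.mod (ca + 1) 5), pfSqA (pfSquareOf seq) rb (PySem.Int.mod (cb + 1) 5)]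
  else if ca = cb then
    [pfSqA (pfSquareOf seq) (PySem.Int.mod (ra + 1) 5) ca, pfSqA (pfSquareOf seq) (PySem.Int.mod (rb + 1) 5) cb]
  else
    [pfSqA (pfSquareOf seq) ra cb, pfSqA (pfSquareOf seq) rb ca]

-- A's per-digraph output equals the value B's table stores at the same flat indices
lemma ga_eq_val (seq : List Char) (h25 : seq.length = 25) (hnd : seq.Nodup)
    (i j : Nat) (hi : i < seq.length) (hj : j < seq.length) :
    pfGA seq (seq[i], seq[j]) = pfVal seq i j := by
  have hgeta := pos_get seq h25 hnd i hi
  have hgetb := pos_get seq h25 hnd j hj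
  have hfd : ∀ k : Nat, PySem.Int.floordiv (k : Int) 5 = ((k / 5 : Nat) : Int) := by
    intro k; exact_mod_cast PySem.Int.floordiv_natCast k 5
  have hmd : ∀ k : Nat, PySem.Int.mod (k : Int) 5 = ((k % 5 : Nat) : Int) := by
    intro k; exact_mod_cast PySem.Int.mod_natCast k 5
  have hSQ := (square_pos_char seq h25).2
  unfold pfGA pfVal
  simp only [hgeta, hgetb, Option.getD_some, hfd, hmd]
  have hb5 : (0:Int) < 5 := by norm_num
  have hra : (0:Int) ≤ ((i / 5 : Nat) : Int) ∧ ((i / 5 : Nat) : Int) < 5 :=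
    ⟨by positivity, by push_cast; omega⟩
  have hrb : (0:Int) ≤ ((j / 5 : Nat) : Int) ∧ ((j / 5 : Nat) : Int) < 5 :=
    ⟨by positivity, by push_cast; omega⟩
  have hca : (0:Int) ≤ ((i % 5 : Nat) : Int) ∧ ((i % 5 : Nat) : Int) < 5 :=
    ⟨by positivity, by push_cast; omega⟩
  have hcb : (0:Int) ≤ ((j % 5 : Nat) : Int) ∧ ((j % 5 : Nat) : Int) < 5 :=
    ⟨by positivity, by push_cast; omega⟩
  have hmodb : ∀ x : Int, 0 ≤ PySem.Int.mod x 5 ∧ PySem.Int.mod x 5 < 5 := fun x =>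
    ⟨PySem.Int.mod_nonneg x hb5, PySem.Int.mod_lt x hb5⟩
  split_ifs with h1 h2
  · rw [hSQ _ _ hra.1 hra.2 (hmodb _).1 (hmodb _).2,
        hSQ _ _ hrb.1 hrb.2 (hmodb _).1 (hmodb _).2]
    rfl
  · rw [hSQ _ _ (hmodb _).1 (hmodb _).2 hca.1 hca.2,
        hSQ _ _ (hmodb _).1 (hmodb _).2 hcb.1 hcb.2]
    rfl
  · rw [hSQ _ _ hra.1 hra.2 hcb.1 hcb.2,
        hSQ _ _ hrb.1 hrb.2 hca.1 hca.2]
    rfl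

-- === B's table ===
lemma table_flat (seq : List Char) :
    pfTable seq = (seq.zipIdx ×ˢ seq.zipIdx).foldl
      (fun d p => d.insert (String.ofList [p.1.1, p.2.1]) (pfVal seq p.1.2 p.2.2))
      PySem.Dict.empty := by
  unfold pfTable
  rw [show (seq.zipIdx ×ˢ seq.zipIdx)
        = seq.zipIdx.flatMap (fun ai => seq.zipIdx.map (Prod.mk ai)) from rfl,
      List.foldl_flatMap]
  simp [List.foldl_map]

lemma key_inj (seq : List Char) (hnd : seq.Nodup) :
    ∀ p ∈ seq.zipIdx ×ˢ seq.zipIdx, ∀ q ∈ seq.zipIdx ×ˢ seq.zipIdx,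
      String.ofList [p.1.1, p.2.1] = String.ofList [q.1.1, q.2.1] → p = q := by
  intro p hp q hq he
  obtain ⟨⟨a, i⟩, ⟨b, j⟩⟩ := p
  obtain ⟨⟨a', i'⟩, ⟨b', j'⟩⟩ := q
  obtain ⟨hp1, hp2⟩ := List.mem_product.mp hp
  obtain ⟨hq1, hq2⟩ := List.mem_product.mp hq
  have ha := List.mk_mem_zipIdx_iff_getElem?.mp hp1
  have hb := List.mk_mem_zipIdx_iff_getElem?.mp hp2
  have ha' := List.mk_mem_zipIdx_iff_getElem?.mp hq1
  have hb' := List.mk_mem_zipIdx_iff_getElem?.mp hq2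
  have he' : a = a' ∧ b = b' := by
    have := congrArg String.toList he
    simpa using this
  obtain ⟨rfl, rfl⟩ := he'
  have hii : i = i' := by
    have h1 : i < seq.length := (List.getElem?_eq_some_iff.mp ha).1
    have h2 : i' < seq.length := (List.getElem?_eq_some_iff.mp ha').1
    have e1 : seq[i] = a := (List.getElem?_eq_some_iff.mp ha).2
    have e2 : seq[i'] = a := (List.getElem?_eq_some_iff.mp ha').2
    exact (List.Nodup.getElem_inj_iff hnd).mp (e1.trans e2.symm)
  have hjj : j = j' := by
    have h1 : j < seq.length := (List.getElem?_eq_some_iff.mp hb).1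
    have h2 : j' < seq.length := (List.getElem?_eq_some_iff.mp hb').1
    have e1 : seq[j] = b := (List.getElem?_eq_some_iff.mp hb).2
    have e2 : seq[j'] = b := (List.getElem?_eq_some_iff.mp hb').2
    exact (List.Nodup.getElem_inj_iff hnd).mp (e1.trans e2.symm)
  rw [hii, hjj]

lemma table_items (seq : List Char) (hnd : seq.Nodup) :
    (pfTable seq).items = (seq.zipIdx ×ˢ seq.zipIdx).map
      (fun p => (String.ofList [p.1.1, p.2.1], pfVal seq p.1.2 p.2.2)) := by
  rw [table_flat]
  have hzn : (seq.zipIdx).Nodup := List.Nodup.of_map Prod.snd (List.nodup_zipIdx_map_snd seq)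
  have hknd : ((seq.zipIdx ×ˢ seq.zipIdx).map (fun p => String.ofList [p.1.1, p.2.1])).Nodup :=
    List.Nodup.map_on (key_inj seq hnd) (List.Nodup.product hzn hzn)
  rw [PySem.Dict.items_foldl_insert_fresh (seq.zipIdx ×ˢ seq.zipIdx)
        (fun p => String.ofList [p.1.1, p.2.1]) (fun p => pfVal seq p.1.2 p.2.2)
        PySem.Dict.empty (fun _ _ => rfl) hknd]
  show PySem.Dict.empty.items ++ _ = _
  rw [show (PySem.Dict.empty : PySem.Dict String (List Char)).items = [] from rfl, List.nil_append]

lemma table_get (seq : List Char) (hnd : seq.Nodup)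
    (i j : Nat) (hi : i < seq.length) (hj : j < seq.length) :
    (pfTable seq).get? (String.ofList [seq[i], seq[j]]) = some (pfVal seq i j) := by
  have hzn : (seq.zipIdx).Nodup := List.Nodup.of_map Prod.snd (List.nodup_zipIdx_map_snd seq)
  have hmem : ((seq[i], i), (seq[j], j)) ∈ seq.zipIdx ×ˢ seq.zipIdx := by
    refine List.mem_product.mpr ⟨?_, ?_⟩ <;>
      (rw [List.mk_mem_zipIdx_iff_getElem?]; simp [hi, hj])
  apply PySem.Dict.get?_of_mem_items
  · rw [table_items seq hnd]
    exact List.mem_map.mpr ⟨((seq[i], i), (seq[j], j)), hmem, rfl⟩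
  · show ((pfTable seq).items.map (·.1)).Nodup
    rw [table_items seq hnd, List.map_map]
    exact List.Nodup.map_on (key_inj seq hnd) (List.Nodup.product hzn hzn)

lemma pairs_mem : ∀ s : List Char, (∀ c ∈ s, c ∈ pfALPHA) →
    ∀ ab ∈ pfPairs s, ab.1 ∈ pfALPHA ∧ ab.2 ∈ pfALPHA := by
  intro s
  induction s using pfPairs.induct with
  | case1 => intro _ ab hab; simp [pfPairs] at hab
  | case2 a =>
    intro hs ab hab
    simp only [pfPairs, List.mem_singleton] at hab
    subst hab
    exact ⟨hs a (by simp), by show ('X' : Char) ∈ pfALPHA; decide⟩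
  | case3 a b r hab ih =>
    intro hs ab hmem
    rw [pfPairs, if_pos hab] at hmem
    rcases List.mem_cons.mp hmem with rfl | hmem
    · exact ⟨hs a (by simp), by show ('X' : Char) ∈ pfALPHA; decide⟩
    · exact ih (fun c hc => hs c (List.mem_cons_of_mem a hc)) ab hmem
  | case4 a b r hab ih =>
    intro hs ab hmem
    rw [pfPairs, if_neg hab] at hmem
    rcases List.mem_cons.mp hmem with rfl | hmem
    · exact ⟨hs a (by simp), hs b (by simp)⟩
    · exact ih (fun c hc => hs c (by simp [hc])) ab hmem

lemma foldA_flatMap (seq : List Char) (l : List (Char × Char)) :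
    l.foldl
      (fun out ab =>
        let ra := (((pfPosOf seq).get? ab.1).getD (0, 0)).1
        let ca := (((pfPosOf seq).get? ab.1).getD (0, 0)).2
        let rb := (((pfPosOf seq).get? ab.2).getD (0, 0)).1
        let cb := (((pfPosOf seq).get? ab.2).getD (0, 0)).2
        if ra = rb then
          out ++ [pfSqA (pfSquareOf seq) ra (PySem.Int.mod (ca + 1) 5)] ++ [pfSqA (pfSquareOf seq) rb (PySem.Int.mod (cb + 1) 5)]
        else if ca = cb then
          out ++ [pfSqA (pfSquareOf seq) (PySem.Int.mod (ra + 1) 5) ca] ++ [pfSqA (pfSquareOf seq) (PySem.Int.mod (rb + 1) 5) cb]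
        else
          out ++ [pfSqA (pfSquareOf seq) ra cb] ++ [pfSqA (pfSquareOf seq) rb ca])
      [] = l.flatMap (pfGA seq) := by
  have hstep : (fun (out : List Char) (ab : Char × Char) =>
      let ra := (((pfPosOf seq).get? ab.1).getD (0, 0)).1
      let ca := (((pfPosOf seq).get? ab.1).getD (0, 0)).2
      let rb := (((pfPosOf seq).get? ab.2).getD (0, 0)).1
      let cb := (((pfPosOf seq).get? ab.2).getD (0, 0)).2
      if ra = rb then
        out ++ [pfSqA (pfSquareOf seq) ra (PySem.Int.mod (ca + 1) 5)] ++ [pfSqA (pfSquareOf seq) rb (PySem.Int.mod (cb + 1) 5)]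
      else if ca = cb then
        out ++ [pfSqA (pfSquareOf seq) (PySem.Int.mod (ra + 1) 5) ca] ++ [pfSqA (pfSquareOf seq) (PySem.Int.mod (rb + 1) 5) cb]
      else
        out ++ [pfSqA (pfSquareOf seq) ra cb] ++ [pfSqA (pfSquareOf seq) rb ca])
      = (fun out ab => out ++ pfGA seq ab) := by
    funext out ab
    unfold pfGA
    dsimp only
    split_ifs <;> simp
  rw [hstep]
  simpa using PySem.List.foldl_append_eq_flatMap (pfGA seq) l []

def pfSeq (key : List Char) : List Char := PySem.Set.ofList (pfClean key ++ pfALPHA)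

lemma pfSquare_eq (key : List Char) :
    pfSquare key = (pfSquareOf (pfSeq key), pfPosOf (pfSeq key)) := by
  unfold pfSquare pfSeq
  dsimp only
  rw [seqAB (pfClean key ++ pfALPHA) PySem.Set.empty [] (fun _ => rfl),
      seqB_ofList (pfClean key ++ pfALPHA)]

lemma A_eq (text key : String) :
    encrypt_playfair text key
      = String.ofList ((pfPairs (pfClean text.toList)).flatMap (pfGA (pfSeq key.toList))) := by
  unfold encrypt_playfair
  rw [pfSquare_eq]
  dsimp only
  rw [foldA_flatMap (pfSeq key.toList) (pfPairs (pfClean text.toList))]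

lemma B_eq (text key : String) :
    encrypt_playfair_alt text key
      = String.ofList (((pfPairs (pfClean text.toList)).map
          (fun ab => ((pfTable (pfSeq key.toList)).get? (String.ofList [ab.1, ab.2])).getD [])).flatten) := by
  unfold encrypt_playfair_alt
  dsimp only
  rw [show PySem.List.dedup (pfClean key.toList ++ pfALPHA) = pfSeq key.toList by
        rw [PySem.List.dedup_eq_ofList]; rfl,
      show (if ((pfClean text.toList).foldl pfNormStep []).length % 2 == 1
              then (pfClean text.toList).foldl pfNormStep [] ++ ['X']
              else (pfClean text.toList).foldl pfNormStep [])
           = pfFinal ((pfClean text.toList).foldl pfNormStep []) from rfl,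
      sliceEvens, sliceOdds, zip_evens_odds, ← pairs_norm]

lemma seq_facts (key : List Char) :
    (pfSeq key).Nodup ∧ (pfSeq key).length = 25 ∧ (∀ c, c ∈ pfSeq key ↔ c ∈ pfALPHA) := by
  have hnd : (pfSeq key).Nodup := PySem.Set.nodup_ofList _
  have hmem : ∀ c, c ∈ pfSeq key ↔ c ∈ pfALPHA := by
    intro c
    rw [pfSeq, PySem.Set.mem_ofList, List.mem_append]
    exact ⟨fun h => h.elim (fun h => clean_mem_alpha h) id, Or.inr⟩
  have hperm : (pfSeq key).Perm pfALPHA := (List.perm_ext_iff_of_nodup hnd (by decide)).mpr hmem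
  exact ⟨hnd, by simpa using hperm.length_eq, hmem⟩

-- ===== VERDICT (by name: the statement is the Claim_ definition above) =====
theorem encrypt_playfair_spec : Claim_equal_encrypt_playfair := by
  intro text key _
  show encrypt_playfair text key = encrypt_playfair_alt text key
  rw [A_eq, B_eq, List.flatMap_def]
  obtain ⟨hnd, h25, hmem⟩ := seq_facts key.toList
  have hmap : (pfPairs (pfClean text.toList)).map (pfGA (pfSeq key.toList))
      = (pfPairs (pfClean text.toList)).map
          (fun ab => ((pfTable (pfSeq key.toList)).get? (String.ofList [ab.1, ab.2])).getD []) := by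
    apply List.map_congr_left
    intro ab hab
    obtain ⟨x, y⟩ := ab
    have hm := pairs_mem (pfClean text.toList) (fun c hc => clean_mem_alpha hc) (x, y) hab
    obtain ⟨i, hi, rfl⟩ := List.mem_iff_getElem.mp ((hmem x).mpr hm.1)
    obtain ⟨j, hj, rfl⟩ := List.mem_iff_getElem.mp ((hmem y).mpr hm.2)
    rw [table_get (pfSeq key.toList) hnd i j hi hj, Option.getD_some]
    exact ga_eq_val (pfSeq key.toList) h25 hnd i j hi hj
  exact congrArg String.ofList (congrArg List.flatten hmap)
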